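-- pv_equiv track=rewrite | github.com/codingbull87/uncodeuncle | scripts/repair_layout.py | expand_group_targets
-- ===== SOURCE A (Python) =====
-- from typing import Any
--
-- def expand_group_targets(
--     target_ids: list[str],
--     raw_index: dict[str, dict[str, Any]],
--     effective_index: dict[str, dict[str, Any]],
--     raw_groups: dict[str, list[str]],
--     effective_groups: dict[str, list[str]],
-- ) -> list[str]:
--     expanded: list[str] = []
--     seen: set[str] = set()
--
--     def add(chart_id: str) -> None:
--         if chart_id and chart_id not in seen:
--             seen.add(chart_id)
--             expanded.append(chart_id)
--
--     for chart_id in target_ids: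
--         add(chart_id)
--         for rec in (effective_index.get(chart_id), raw_index.get(chart_id)):
--             if not rec:
--                 continue
--             group = str(rec.get("group", "")).strip()
--             if not group:
--                 continue
--             for member_id in raw_groups.get(group, []) + effective_groups.get(group, []):
--                 add(member_id)
--     return expanded
-- ===== SOURCE B (Python) =====
-- from typing import Any
--
--
-- def expand_group_targets(
--     target_ids: list[str],
--     raw_index: dict[str, dict[str, Any]],
--     effective_index: dict[str, dict[str, Any]],
--     raw_groups: dict[str, list[str]],
--     effective_groups: dict[str, list[str]],
-- ) -> list[str]:
--     # Phase 1: collect the group names each target resolves to, then expand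
--     # them into one flat ordered candidate stream.
--     def groups_of(chart_id: str) -> list[str]:
--         groups: list[str] = []
--         for rec in (effective_index.get(chart_id), raw_index.get(chart_id)):
--             if rec:
--                 g = str(rec.get("group", "")).strip()
--                 if g:
--                     groups.append(g)
--         return groups
--
--     candidates = [
--         c
--         for cid in target_ids
--         for c in [cid] + [m for g in groups_of(cid)
--                           for m in raw_groups.get(g, []) + effective_groups.get(g, [])]
--     ]
--
--     # Phase 2: selection-style dedup with no seen-set/dict: repeatedly take the
--     # first remaining candidate and filter every later copy of it out of the rest.
--     rest = [c for c in candidates if c]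
--     out: list[str] = []
--     while rest:
--         h = rest[0]
--         out.append(h)
--         rest = [c for c in rest[1:] if c != h]
--     return out
-- ===== Notes on version B (the rewrite author's own statement) =====
-- stated objective: alternative
-- what changed: B is a two-phase rewrite: it first collects each target's group names and flattens everything into one ordered candidate stream, then deduplicates with a selection-style loop that repeatedly takes the first remaining candidate and filters its later copies out of the rest, using no seen-set or dict at all.
import Mathlib
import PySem

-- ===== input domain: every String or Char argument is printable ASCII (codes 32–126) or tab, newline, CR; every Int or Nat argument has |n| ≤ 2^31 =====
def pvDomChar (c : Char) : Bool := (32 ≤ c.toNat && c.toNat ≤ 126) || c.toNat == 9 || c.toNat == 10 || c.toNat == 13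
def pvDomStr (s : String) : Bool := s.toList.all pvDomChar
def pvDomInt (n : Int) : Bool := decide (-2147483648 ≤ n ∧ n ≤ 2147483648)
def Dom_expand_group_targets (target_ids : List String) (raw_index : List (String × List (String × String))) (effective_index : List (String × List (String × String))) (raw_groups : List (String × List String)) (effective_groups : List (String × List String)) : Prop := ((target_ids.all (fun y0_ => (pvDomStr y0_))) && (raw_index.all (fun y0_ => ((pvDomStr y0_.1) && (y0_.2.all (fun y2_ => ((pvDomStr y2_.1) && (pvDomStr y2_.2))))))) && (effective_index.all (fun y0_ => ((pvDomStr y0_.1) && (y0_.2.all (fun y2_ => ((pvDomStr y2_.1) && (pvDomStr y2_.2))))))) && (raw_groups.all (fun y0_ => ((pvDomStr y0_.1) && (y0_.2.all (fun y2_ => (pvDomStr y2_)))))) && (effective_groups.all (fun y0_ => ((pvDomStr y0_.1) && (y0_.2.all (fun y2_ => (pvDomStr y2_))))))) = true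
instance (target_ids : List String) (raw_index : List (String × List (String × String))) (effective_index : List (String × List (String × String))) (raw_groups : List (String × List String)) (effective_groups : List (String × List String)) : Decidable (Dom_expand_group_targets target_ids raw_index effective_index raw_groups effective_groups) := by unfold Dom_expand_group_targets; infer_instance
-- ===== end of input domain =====

-- B replaces A's interleaved seen-set/add-helper loop by a two-phase structure: flatten all
-- candidates (via per-target group-name collection), then a selection-style dedup loop with
-- no set/dict (alternative decomposition, not claimed faster); equivalence on all inputs.

-- ===== PORT A =====
-- A's inner helper `add`: state = (expanded, seen)
def pvAdd (st : List String × PySem.Set String) (chart_id : String) : List String × PySem.Set String :=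
  if chart_id ≠ "" ∧ PySem.Set.contains st.2 chart_id = false then
    (st.1 ++ [chart_id], PySem.Set.add st.2 chart_id)
  else st

-- body of A's `for rec in (...)` loop
def pvRecStepA (raw_groups : List (String × List String)) (effective_groups : List (String × List String))
    (st : List String × PySem.Set String) (rec : Option (List (String × String))) : List String × PySem.Set String :=
  match rec with
  | none => st
  | some r =>
    if r = [] then st
    else
      let group := PySem.Str.strip ((PySem.Dict.mk r).getD "group" "")
      if group = "" then st
      else ((PySem.Dict.mk raw_groups).getD group [] ++ (PySem.Dict.mk effective_groups).getD group []).foldl pvAdd st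

def expand_group_targets (target_ids : List String) (raw_index : List (String × List (String × String))) (effective_index : List (String × List (String × String))) (raw_groups : List (String × List String)) (effective_groups : List (String × List String)) : List String :=
  (target_ids.foldl
    (fun st chart_id =>
      [(PySem.Dict.mk effective_index).get? chart_id, (PySem.Dict.mk raw_index).get? chart_id].foldl
        (pvRecStepA raw_groups effective_groups) (pvAdd st chart_id))
    (([] : List String), PySem.Set.empty)).1

-- ===== PORT B =====
-- Source B groups_of: loop over the two recs, appending the stripped non-empty group name
def pvGroupStep (groups : List String) (rec : Option (List (String × String))) : List String :=
  match rec with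
  | none => groups
  | some r =>
    if r = [] then groups
    else
      let g := PySem.Str.strip ((PySem.Dict.mk r).getD "group" "")
      if g = "" then groups else groups ++ [g]

def pvGroupsOf (raw_index : List (String × List (String × String))) (effective_index : List (String × List (String × String))) (chart_id : String) : List String :=
  [(PySem.Dict.mk effective_index).get? chart_id, (PySem.Dict.mk raw_index).get? chart_id].foldl pvGroupStep []

-- Source B's while-loop dedup: take the head, filter its later copies out of the rest
def pvDedupLoop (out : List String) (rest : List String) : List String :=
  match rest with
  | [] => out
  | h :: t => pvDedupLoop (out ++ [h]) (t.filter (fun c => c ≠ h))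
termination_by rest.length
decreasing_by
  simp only [List.length_cons, List.length_unattach]
  exact Nat.lt_succ_of_le (le_trans (List.length_filter_le _ _) (by simp))

def expand_group_targets_alt (target_ids : List String) (raw_index : List (String × List (String × String))) (effective_index : List (String × List (String × String))) (raw_groups : List (String × List String)) (effective_groups : List (String × List String)) : List String :=
  let candidates := target_ids.flatMap (fun cid =>
    cid :: (pvGroupsOf raw_index effective_index cid).flatMap
      (fun g => (PySem.Dict.mk raw_groups).getD g [] ++ (PySem.Dict.mk effective_groups).getD g []))
  pvDedupLoop [] (candidates.filter (fun c => c ≠ ""))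

-- ===== PRECONDITION & SPEC =====
def Spec_expand_group_targets (target_ids : List String) (raw_index : List (String × List (String × String))) (effective_index : List (String × List (String × String))) (raw_groups : List (String × List String)) (effective_groups : List (String × List String)) (out : List String) : Prop := out = expand_group_targets_alt target_ids raw_index effective_index raw_groups effective_groups
instance (target_ids : List String) (raw_index : List (String × List (String × String))) (effective_index : List (String × List (String × String))) (raw_groups : List (String × List String)) (effective_groups : List (String × List String)) (out : List String) : Decidable (Spec_expand_group_targets target_ids raw_index effective_index raw_groups effective_groups out) := by unfold Spec_expand_group_targets; infer_instance

-- ===== CLAIM (what is proved, stated in full; the proofs are below) =====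
def Claim_equal_expand_group_targets : Prop := ∀ (target_ids : List String) (raw_index : List (String × List (String × String))) (effective_index : List (String × List (String × String))) (raw_groups : List (String × List String)) (effective_groups : List (String × List String)), Dom_expand_group_targets target_ids raw_index effective_index raw_groups effective_groups → Spec_expand_group_targets target_ids raw_index effective_index raw_groups effective_groups (expand_group_targets target_ids raw_index effective_index raw_groups effective_groups)

-- ===== LEMMAS AND PROOFS =====

-- the members contributed by one rec, in B's terms
def pvMem (rg eg : List (String × List String)) (g : String) : List String :=
  (PySem.Dict.mk rg).getD g [] ++ (PySem.Dict.mk eg).getD g []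

-- one rec step of A = folding `add` over the members of that rec's group (if any)
theorem pvRecStepA_eq (rg eg : List (String × List String)) (st : List String × PySem.Set String)
    (rec : Option (List (String × String))) :
    pvRecStepA rg eg st rec = List.foldl pvAdd st ((pvGroupStep [] rec).flatMap (pvMem rg eg)) := by
  cases rec with
  | none => simp [pvRecStepA, pvGroupStep]
  | some r =>
    simp only [pvRecStepA, pvGroupStep]
    split_ifs <;> simp [pvMem]

-- pvGroupStep distributes over its accumulator
theorem pvGroupStep_append (groups : List String) (rec : Option (List (String × String))) :
    pvGroupStep groups rec = groups ++ pvGroupStep [] rec := by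
  cases rec with
  | none => simp [pvGroupStep]
  | some r =>
    simp only [pvGroupStep]
    split_ifs <;> simp

-- one chart of A's outer loop = folding `add` over chart_id :: B's members for that chart
theorem pvChart_eq (ri ei : List (String × List (String × String))) (rg eg : List (String × List String))
    (st : List String × PySem.Set String) (cid : String) :
    pvRecStepA rg eg (pvRecStepA rg eg (pvAdd st cid) ((PySem.Dict.mk ei).get? cid)) ((PySem.Dict.mk ri).get? cid)
      = List.foldl pvAdd st
          (cid :: (pvGroupsOf ri ei cid).flatMap (pvMem rg eg)) := by
  simp only [pvGroupsOf, List.foldl_cons, List.foldl_nil]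
  rw [pvRecStepA_eq, pvRecStepA_eq,
      pvGroupStep_append (pvGroupStep [] ((PySem.Dict.mk ei).get? cid)) ((PySem.Dict.mk ri).get? cid)]
  simp [List.foldl_append]

-- A's whole loop = folding `add` over B's candidate stream
theorem pvOuter_eq (ri ei : List (String × List (String × String))) (rg eg : List (String × List String)) :
    ∀ (l : List String) (st : List String × PySem.Set String),
    l.foldl (fun st cid =>
        pvRecStepA rg eg (pvRecStepA rg eg (pvAdd st cid) ((PySem.Dict.mk ei).get? cid)) ((PySem.Dict.mk ri).get? cid)) st
      = List.foldl pvAdd st (l.flatMap (fun cid => cid :: (pvGroupsOf ri ei cid).flatMap (pvMem rg eg))) := by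
  intro l
  induction l with
  | nil => intro st; simp
  | cons c cs ih =>
    intro st
    rw [List.foldl_cons, ih, List.flatMap_cons, List.foldl_append, pvChart_eq]

-- folding `add` from a diagonal state = B's selection-style dedup of the new nonempty candidates
theorem pvFoldAdd_diag : ∀ (cs : List String) (e : List String),
    (List.foldl pvAdd (e, e) cs).1
      = pvDedupLoop e ((cs.filter (fun c => c ≠ "")).filter (fun c => ¬ c ∈ e)) := by
  intro cs
  induction cs with
  | nil => intro e; simp [pvDedupLoop]
  | cons c cs ih =>
    intro e
    rw [List.foldl_cons]
    by_cases hc : c = ""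
    · subst hc
      have h1 : pvAdd (e, e) "" = (e, e) := by simp [pvAdd]
      rw [h1, List.filter_cons_of_neg (by simp)]
      exact ih e
    · rw [List.filter_cons_of_pos (by simp [hc])]
      by_cases hm : c ∈ e
      · have h1 : pvAdd (e, e) c = (e, e) := by
          simp [pvAdd, PySem.Set.contains, hm]
        rw [h1, List.filter_cons_of_neg (by simp [hm])]
        exact ih e
      · have h1 : pvAdd (e, e) c = (e ++ [c], e ++ [c]) := by
          simp [pvAdd, PySem.Set.contains, PySem.Set.add, hc, hm]
        rw [h1, List.filter_cons_of_pos (by simp [hm]), pvDedupLoop, ih (e ++ [c])]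
        congr 1
        simp only [List.filter_filter]
        apply List.filter_congr
        intro x _
        by_cases hx : x ∈ e <;> by_cases hxc : x = c <;>
          simp [hx, hxc, List.mem_append]

-- ===== VERDICT (by name: the statement is the Claim_ definition above) =====
theorem expand_group_targets_spec : Claim_equal_expand_group_targets := by
  intro target_ids ri ei rg eg _
  unfold Spec_expand_group_targets expand_group_targets expand_group_targets_alt
  simp only [List.foldl_cons, List.foldl_nil]
  rw [pvOuter_eq ri ei rg eg target_ids (([] : List String), PySem.Set.empty)]
  have h0 : (PySem.Set.empty : PySem.Set String) = ([] : List String) := rfl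
  rw [h0, pvFoldAdd_diag]
  simp
  rfl
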